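-- pv_equiv track=rewrite | github.com/huyghea/Audit_LAN | audit/rules/temperature.py | _compute_columns
-- ===== SOURCE A (Python) =====
-- from typing import List, Optional, Tuple
--
-- def _compute_columns(header_line: str) -> List[Tuple[str, int, int]]:
--     columns: List[Tuple[str, int, int]] = []
--     length = len(header_line)
--     idx = 0
--     start: Optional[int] = None
--
--     while idx < length:
--         if start is None and header_line[idx] != " ":
--             start = idx
--         elif start is not None and header_line[idx] == " ":
--             end = idx
--             while idx < length and header_line[idx] == " ":
--                 idx += 1
--             name = header_line[start:end].strip().lower()
--             if name:
--                 columns.append((name, start, end))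
--             start = None
--             continue
--         idx += 1
--
--     if start is not None:
--         name = header_line[start:].strip().lower()
--         if name:
--             columns.append((name, start, length))
--
--     return columns
-- ===== SOURCE B (Python) =====
-- from typing import List, Tuple
--
-- def _compute_columns(header_line: str) -> List[Tuple[str, int, int]]:
--     columns: List[Tuple[str, int, int]] = []
--     pos = 0
--     for token in header_line.split(" "):
--         name = token.strip().lower()
--         if name:
--             columns.append((name, pos, pos + len(token)))
--         pos += len(token) + 1
--     return columns
-- ===== Notes on version B (the rewrite author's own statement) =====
-- stated objective: idiomatic
-- what changed: Replaces A's character-by-character index/start state machine (with an inner space-skipping while and a trailing-token epilogue) by a single pass over the tokens of str.split on a single space, keeping a running position and emitting (stripped lowercased name, pos, pos+len(token)) for each non-blank token.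
import Mathlib
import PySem

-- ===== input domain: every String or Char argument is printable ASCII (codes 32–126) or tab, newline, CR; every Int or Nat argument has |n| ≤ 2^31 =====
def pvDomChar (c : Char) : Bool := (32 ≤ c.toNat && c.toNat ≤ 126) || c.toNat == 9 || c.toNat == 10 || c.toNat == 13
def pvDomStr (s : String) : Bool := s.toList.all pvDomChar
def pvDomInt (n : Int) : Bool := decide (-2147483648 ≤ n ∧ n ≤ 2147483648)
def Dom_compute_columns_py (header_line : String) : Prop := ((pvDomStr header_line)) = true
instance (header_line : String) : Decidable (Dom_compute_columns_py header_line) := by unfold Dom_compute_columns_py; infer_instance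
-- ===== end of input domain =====

-- B replaces A's index/start state machine by the idiomatic split(" ")-with-running-position pass (objective: idiomatic; return value proved equal on all inputs).

-- ===== PORT A =====
def pvSkip (s : List Char) (idx : Nat) : Nat :=
  if h : idx < s.length then
    if s[idx] = ' ' then pvSkip s (idx + 1) else idx
  else idx
termination_by s.length - idx
theorem pvSkip_le_aux (s : List Char) (idx : Nat) : idx ≤ pvSkip s idx := by
  fun_induction pvSkip s idx <;> omega
def pvLoopA (s : List Char) (idx : Nat) (start : Option Nat) (cols : List (String × Int × Int)) :
    List (String × Int × Int) :=
  if h : idx < s.length then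
    match start with
    | none =>
      if s[idx] ≠ ' ' then pvLoopA s (idx + 1) (some idx) cols
      else pvLoopA s (idx + 1) none cols
    | some st =>
      if s[idx] = ' ' then
        let e := idx
        let idx' := pvSkip s (idx + 1)
        let name := PySem.Chars.lower (PySem.Chars.strip (PySem.List.slice s (some (st : Int)) (some (e : Int))))
        pvLoopA s idx' none
          (if name ≠ [] then cols ++ [(String.ofList name, (st : Int), (e : Int))] else cols)
      else pvLoopA s (idx + 1) (some st) cols
  else
    match start with
    | none => cols
    | some st =>
      let name := PySem.Chars.lower (PySem.Chars.strip (PySem.List.slice s (some (st : Int)) none))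
      if name ≠ [] then cols ++ [(String.ofList name, (st : Int), (s.length : Int))] else cols
termination_by s.length + 1 - idx
decreasing_by
  all_goals first
    | omega
    | (have := pvSkip_le_aux s (idx + 1); omega)

def compute_columns_py (header_line : String) : List (String × Int × Int) :=
  pvLoopA header_line.toList 0 none []

-- ===== PORT B =====
def compute_columns_py_alt (header_line : String) : List (String × Int × Int) :=
  let tokens := (PySem.Str.split? header_line " ").getD []
  (tokens.foldl
    (fun (acc : List (String × Int × Int) × Int) token =>
      let name := PySem.Str.lower (PySem.Str.strip token)
      let cols :=
        if name ≠ "" then acc.1 ++ [(name, acc.2, acc.2 + PySem.Str.len token)] else acc.1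
      (cols, acc.2 + PySem.Str.len token + 1))
    ([], 0)).1

-- ===== PRECONDITION & SPEC =====
def Spec_compute_columns_py (header_line : String) (out : List (String × Int × Int)) : Prop := out = compute_columns_py_alt header_line
instance (header_line : String) (out : List (String × Int × Int)) : Decidable (Spec_compute_columns_py header_line out) := by unfold Spec_compute_columns_py; infer_instance

-- ===== CLAIM (what is proved, stated in full; the proofs are below) =====
def Claim_equal_compute_columns_py : Prop := ∀ (header_line : String), Dom_compute_columns_py header_line → Spec_compute_columns_py header_line (compute_columns_py header_line)

-- ===== LEMMAS AND PROOFS =====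
def pvSplit : List Char → List Char → List (List Char)
  | cur, [] => [cur]
  | cur, c :: rest => if c = ' ' then cur :: pvSplit [] rest else pvSplit (cur ++ [c]) rest
def pvFoldB : List (List Char) → Int → List (String × Int × Int) → List (String × Int × Int)
  | [], _, cols => cols
  | t :: ts, pos, cols =>
    let name := PySem.Chars.lower (PySem.Chars.strip t)
    pvFoldB ts (pos + t.length + 1)
      (if name ≠ [] then cols ++ [(String.ofList name, pos, pos + t.length)] else cols)
theorem pvStripNil : PySem.Chars.lower (PySem.Chars.strip ([] : List Char)) = [] := by
  decide
theorem pvFoldB_empty_cons (ts : List (List Char)) (pos : Int) (cols : List (String × Int × Int)) :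
    pvFoldB ([] :: ts) pos cols = pvFoldB ts (pos + 1) cols := by
  simp [pvFoldB, pvStripNil]
theorem pvSplitOn_go_eq : ∀ (fuel : Nat) (l cur : List Char) (acc : List (List Char)),
    l.length < fuel →
    PySem.Chars.splitOn.go [' '] fuel l cur acc = acc.reverse ++ pvSplit cur.reverse l := by
  intro fuel
  induction fuel with
  | zero => omega
  | succ n ih =>
    intro l cur acc hl
    match l with
    | [] => simp [PySem.Chars.splitOn.go, pvSplit]
    | c :: rest =>
      simp only [List.length_cons] at hl
      by_cases hc : c = ' '
      · subst hc
        simp only [PySem.Chars.splitOn.go, List.isPrefixOf, BEq.rfl, Bool.true_and, pvSplit]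
        simp only [if_true, List.length_cons, List.drop_succ_cons, List.length_nil, List.drop_zero]
        rw [ih rest [] (cur.reverse :: acc) (by omega)]
        simp [pvSplit]
      · have hbeq : (' ' == c) = false := by simp [BEq.symm_false]; exact fun h => hc h.symm
        simp only [PySem.Chars.splitOn.go, List.isPrefixOf, hbeq, Bool.false_and, if_neg,
          Bool.false_eq_true, not_false_iff]
        rw [ih rest (c :: cur) acc (by omega)]
        simp [pvSplit, hc]
theorem pvSplitOn_eq (s : List Char) : PySem.Chars.splitOn s [' '] = pvSplit [] s := by
  unfold PySem.Chars.splitOn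
  rw [pvSplitOn_go_eq (s.length + 1) s [] [] (by omega)]
  simp
theorem pvName_eq (t : List Char) :
    PySem.Str.lower (PySem.Str.strip (String.ofList t)) =
      String.ofList (PySem.Chars.lower (PySem.Chars.strip t)) := by
  rw [show PySem.Str.lower (PySem.Str.strip (String.ofList t)) = String.ofList (PySem.Str.lower (PySem.Str.strip (String.ofList t))).toList from (String.ofList_toList).symm]
  simp
theorem pvOfList_ne_empty_iff (l : List Char) : (String.ofList l ≠ "") ↔ l ≠ [] := by
  constructor
  · intro h hl; subst hl; simp at h
  · intro h he
    have : (String.ofList l).toList = "".toList := by rw [he]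
    simp at this
    exact h this
theorem pvFoldB_eq (ts : List (List Char)) : ∀ (pos : Int) (cols : List (String × Int × Int)),
    ((ts.map String.ofList).foldl
      (fun (acc : List (String × Int × Int) × Int) token =>
        let name := PySem.Str.lower (PySem.Str.strip token)
        let cols :=
          if name ≠ "" then acc.1 ++ [(name, acc.2, acc.2 + PySem.Str.len token)] else acc.1
        (cols, acc.2 + PySem.Str.len token + 1))
      (cols, pos)).1 = pvFoldB ts pos cols := by
  induction ts with
  | nil => intro pos cols; simp [pvFoldB]
  | cons t ts ih =>
    intro pos cols
    simp only [List.map_cons, List.foldl_cons, pvFoldB, pvName_eq, PySem.Str.len_eq,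
      String.toList_ofList, pvOfList_ne_empty_iff]
    exact ih _ _
theorem pvSkip_le_length (s : List Char) (idx : Nat) (h : idx ≤ s.length) :
    pvSkip s idx ≤ s.length := by
  fun_induction pvSkip s idx <;> omega
theorem pvSK (s : List Char) : ∀ (j : Nat), j ≤ s.length → ∀ (cols : List (String × Int × Int)),
    pvFoldB (pvSplit [] (s.drop j)) (j : Int) cols =
      pvFoldB (pvSplit [] (s.drop (pvSkip s j))) ((pvSkip s j : Nat) : Int) cols := by
  intro j
  fun_induction pvSkip s j with
  | case1 i h hsp ih =>
    intro hij cols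
    have hdrop : s.drop i = s[i] :: s.drop (i + 1) := List.drop_eq_getElem_cons h
    rw [hdrop, hsp]
    show pvFoldB (pvSplit [] (' ' :: s.drop (i+1))) (i : Int) cols = _
    have : pvSplit [] (' ' :: s.drop (i+1)) = [] :: pvSplit [] (s.drop (i+1)) := by
      simp [pvSplit]
    rw [this, pvFoldB_empty_cons]
    have hcast : ((i : Int) + 1) = ((i + 1 : Nat) : Int) := by push_cast; ring
    rw [hcast, ih (by omega)]
  | case2 i h hsp => intro _ _; rfl
  | case3 i h => intro _ _; rfl
theorem pvTake_succ (s : List Char) (st idx : Nat) (h1 : st ≤ idx) (h2 : idx < s.length) :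
    (s.drop st).take (idx + 1 - st) = (s.drop st).take (idx - st) ++ [s[idx]] := by
  have hlen : idx - st < (s.drop st).length := by
    simp [List.length_drop]; omega
  have he : idx + 1 - st = (idx - st) + 1 := by omega
  rw [he, List.take_add_one, List.getElem?_eq_getElem hlen]
  have he2 : st + (idx - st) = idx := by omega
  have : (s.drop st)[idx - st] = s[idx] := by
    rw [List.getElem_drop]
    congr 1
  simp [this]
theorem pvMainEnd (s : List Char) :
    (∀ cols, pvLoopA s s.length none cols =
      pvFoldB (pvSplit [] (s.drop s.length)) ((s.length : Nat) : Int) cols) ∧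
    (∀ st cols, st ≤ s.length →
      pvLoopA s s.length (some st) cols =
        pvFoldB (pvSplit ((s.drop st).take (s.length - st)) (s.drop s.length)) (st : Int) cols) := by
  constructor
  · intro cols
    rw [pvLoopA]
    simp [pvSplit, pvFoldB, pvStripNil]
  · intro st cols hst
    rw [pvLoopA]
    have hne : ¬ s.length < s.length := by omega
    rw [dif_neg hne]
    have hcur : (s.drop st).take (s.length - st) = s.drop st := by
      apply List.take_of_length_le; simp [List.length_drop]
    rw [List.drop_length, hcur]
    show _ = pvFoldB [s.drop st] (st : Int) cols
    have hpos : (st : Int) + ((s.drop st).length : Int) = (s.length : Int) := by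
      simp [List.length_drop]; omega
    simp only [pvFoldB, pvSplit, hpos]
    rw [PySem.List.slice_from_natCast]
theorem pvMain (s : List Char) : ∀ (n idx : Nat), s.length - idx ≤ n → idx ≤ s.length →
    (∀ cols, pvLoopA s idx none cols = pvFoldB (pvSplit [] (s.drop idx)) (idx : Int) cols) ∧
    (∀ st cols, st ≤ idx →
      pvLoopA s idx (some st) cols =
        pvFoldB (pvSplit ((s.drop st).take (idx - st)) (s.drop idx)) (st : Int) cols) := by
  intro n
  induction n with
  | zero =>
    intro idx hn hle
    have : idx = s.length := by omega
    subst this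
    exact ⟨(pvMainEnd s).1, fun st cols hst => (pvMainEnd s).2 st cols hst⟩
  | succ n ih =>
    intro idx hn hle
    by_cases h : idx < s.length
    · have hdrop : s.drop idx = s[idx] :: s.drop (idx + 1) := List.drop_eq_getElem_cons h
      have hcast1 : ((idx : Int) + 1) = ((idx + 1 : Nat) : Int) := by push_cast; ring
      constructor
      · intro cols
        rw [pvLoopA, dif_pos h]
        by_cases hc : s[idx] = ' '
        · simp only [hc, ne_eq, not_true_eq_false, if_false, ite_false]
          rw [(ih (idx + 1) (by omega) (by omega)).1 cols]
          rw [hdrop, hc]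
          show _ = pvFoldB (pvSplit [] (' ' :: s.drop (idx + 1))) (idx : Int) cols
          have : pvSplit [] (' ' :: s.drop (idx + 1)) = [] :: pvSplit [] (s.drop (idx + 1)) := by
            simp [pvSplit]
          rw [this, pvFoldB_empty_cons, hcast1]
        · simp only [hc, ne_eq, not_false_eq_true, if_true, ite_true]
          rw [(ih (idx + 1) (by omega) (by omega)).2 idx cols (by omega)]
          have h1 : (s.drop idx).take (idx + 1 - idx) = [s[idx]] := by
            rw [show idx + 1 - idx = 1 from by omega, hdrop, List.take_succ_cons, List.take_zero]
          have h2 : pvSplit [] (s[idx] :: s.drop (idx + 1)) = pvSplit [s[idx]] (s.drop (idx + 1)) := by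
            simp [pvSplit, hc]
          rw [h1, hdrop, h2]
      · intro st cols hst
        rw [pvLoopA, dif_pos h]
        by_cases hc : s[idx] = ' '
        · simp only [hc, if_true, ite_true]
          -- A takes the space branch: emit token, skip spaces, continue in `none` state
          have hskl : pvSkip s (idx + 1) ≤ s.length := pvSkip_le_length s (idx + 1) (by omega)
          have hskg : idx + 1 ≤ pvSkip s (idx + 1) := pvSkip_le_aux s (idx + 1)
          rw [(ih (pvSkip s (idx + 1)) (by omega) hskl).1]
          rw [← pvSK s (idx + 1) (by omega)]
          -- now both sides are pvFoldB over drop (idx+1)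
          have hcur : PySem.List.slice s (some (st : Int)) (some (idx : Int)) =
              (s.drop st).take (idx - st) := PySem.List.slice_natCast s st idx
          have hlen : ((s.drop st).take (idx - st)).length = idx - st := by
            simp [List.length_take, List.length_drop]; omega
          have hpos : (st : Int) + (((s.drop st).take (idx - st)).length : Int) = (idx : Int) := by
            rw [hlen]; omega
          rw [hdrop, hc]
          show _ = pvFoldB (pvSplit ((s.drop st).take (idx - st)) (' ' :: s.drop (idx + 1))) (st : Int) cols
          have h2 : pvSplit ((s.drop st).take (idx - st)) (' ' :: s.drop (idx + 1)) =
              ((s.drop st).take (idx - st)) :: pvSplit [] (s.drop (idx + 1)) := by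
            simp [pvSplit]
          rw [h2]
          show pvFoldB (pvSplit [] (s.drop (idx + 1))) ((idx + 1 : Nat) : Int) _ = _
          simp only [pvFoldB, hcur, hpos, hcast1]
        · simp only [hc, if_false, ite_false]
          rw [(ih (idx + 1) (by omega) (by omega)).2 st cols (by omega)]
          rw [pvTake_succ s st idx hst h, hdrop]
          have h2 : pvSplit ((s.drop st).take (idx - st)) (s[idx] :: s.drop (idx + 1)) =
              pvSplit ((s.drop st).take (idx - st) ++ [s[idx]]) (s.drop (idx + 1)) := by
            simp [pvSplit, hc]
          rw [h2]
    · have : idx = s.length := by omega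
      subst this
      exact ⟨(pvMainEnd s).1, fun st cols hst => (pvMainEnd s).2 st cols hst⟩

-- ===== VERDICT (by name: the statement is the Claim_ definition above) =====
theorem compute_columns_py_spec : Claim_equal_compute_columns_py := by
  intro header _
  unfold Spec_compute_columns_py compute_columns_py compute_columns_py_alt
  have hA := (pvMain header.toList header.toList.length 0 (by omega) (by omega)).1 []
  simp only [List.drop_zero, Nat.cast_zero] at hA
  rw [hA]
  have hsep : (" " : String).toList = [' '] := rfl
  simp only [PySem.Str.split?, PySem.Chars.split?, hsep, List.isEmpty_cons, if_false,
    Option.map_some, Option.getD_some, Bool.false_eq_true]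
  rw [pvSplitOn_eq, pvFoldB_eq]
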